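-- pv_equiv track=rewrite | github.com/francoisdm/francoisdm.github.io | dhlw-tru-casestudy/aggregate_subjects.py | create_python_regex
-- ===== SOURCE A (Python) =====
-- def create_python_regex(exp):
-- 	final_list = []
-- 	str = "(^|\s|-|$)("
--
-- 	exp = exp.strip()
--
-- 	l = exp.split(" ")
-- 	for w in l:
-- 		w = w.replace('"', '') # take out quotation marks
-- 		w = w.replace("*", "([a-zA-Z]*)")
-- 		w = w.replace("(", "")
-- 		w = w.replace(")", "")
-- 		if w == "OR":
-- 			str += ")(^|\s|-|$)|(^|\s|-|$)("
-- 		elif w == "AND":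
-- 			str += ")(^|\s|-|$)"
-- 			final_list.append(str)
-- 			str = "(^|\s|-|$)("
-- 		else:
-- 			if str[len(str)-1] != "(":
-- 				str += " "
-- 			str += w
-- 	str += ")(^|\s|-|$)"
-- 	final_list.append(str)
--
-- 	return final_list
-- ===== SOURCE B (Python) =====
-- def create_python_regex(exp):
--     B = "(^|\\s|-|$)"
--     SEP = ")" + B + "|" + B + "("
--
--     def clean(t):
--         t = t.replace('"', '')
--         t = t.replace("*", "([a-zA-Z]*)")
--         t = t.replace("(", "")
--         t = t.replace(")", "")
--         return t
--
--     def split_on(tokens, sep):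
--         groups, cur = [], []
--         for t in tokens:
--             if t == sep:
--                 groups.append(cur)
--                 cur = []
--             else:
--                 cur.append(t)
--         return groups + [cur]
--
--     def render(words):
--         s = ""
--         for w in words:
--             if s:
--                 s += " "
--             s += w
--         return s
--
--     tokens = [clean(t) for t in exp.strip().split(" ")]
--     return [B + "(" + SEP.join(render(alt) for alt in split_on(seg, "OR")) + ")" + B
--             for seg in split_on(tokens, "AND")]
-- ===== Notes on version B (the rewrite author's own statement) =====
-- stated objective: simpler
-- what changed: B cleans all tokens up front, partitions them into AND-segments and OR-alternatives with a generic split helper, renders each alternative by joining its words, and wraps each segment, replacing A's single running string with its last-character test and manual separator splicing.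
import Mathlib
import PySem

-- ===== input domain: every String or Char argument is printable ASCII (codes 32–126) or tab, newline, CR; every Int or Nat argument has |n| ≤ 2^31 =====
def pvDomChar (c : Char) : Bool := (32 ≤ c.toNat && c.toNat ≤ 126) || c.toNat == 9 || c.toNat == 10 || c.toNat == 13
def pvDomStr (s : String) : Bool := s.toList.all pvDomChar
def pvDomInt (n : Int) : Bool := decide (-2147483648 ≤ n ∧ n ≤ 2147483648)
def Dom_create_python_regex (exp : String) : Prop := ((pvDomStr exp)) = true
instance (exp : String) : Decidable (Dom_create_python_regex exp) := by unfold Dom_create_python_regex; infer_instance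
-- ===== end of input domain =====

-- B regroups the cleaned tokens into AND-segments and OR-alternatives and joins the rendered
-- pieces, instead of A's single running string with a last-character test (objective: simpler
-- decomposition, same cost). Both ports work on List Char (PySem.Chars) and build Strings last.

-- ===== PORT A =====
-- the three literal string constants of Source A, as char lists
def pvPfx : List Char := "(^|\\s|-|$)(".toList
def pvSuf : List Char := ")(^|\\s|-|$)".toList
def pvSep : List Char := ")(^|\\s|-|$)|(^|\\s|-|$)(".toList

-- the loop body of A: four replaces, then the OR / AND / word branches on (final_list, str)
def pvStepA (st : List (List Char) × List Char) (w : List Char) : List (List Char) × List Char :=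
  let w := PySem.Chars.replace w ['"'] []
  let w := PySem.Chars.replace w ['*'] "([a-zA-Z]*)".toList
  let w := PySem.Chars.replace w ['('] []
  let w := PySem.Chars.replace w [')'] []
  if w = "OR".toList then (st.1, st.2 ++ pvSep)
  else if w = "AND".toList then (st.1 ++ [st.2 ++ pvSuf], pvPfx)
  else
    -- str[len(str)-1] != "(" ; str is never empty here, so the Python indexing never raises
    let s := if PySem.Chars.pyGet? st.2 (PySem.Chars.len st.2 - 1) ≠ some '(' then st.2 ++ [' '] else st.2
    (st.1, s ++ w)

def create_python_regex (exp : String) : List String :=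
  let l := PySem.Chars.splitOn (PySem.Chars.strip exp.toList) [' ']
  let st := l.foldl pvStepA ([], pvPfx)
  (st.1 ++ [st.2 ++ pvSuf]).map String.ofList

-- ===== PORT B =====
-- clean(t) of Source B: the same four replaces, applied up front
def pvClean (w : List Char) : List Char :=
  PySem.Chars.replace (PySem.Chars.replace (PySem.Chars.replace
    (PySem.Chars.replace w ['"'] []) ['*'] "([a-zA-Z]*)".toList) ['('] []) [')'] []

-- split_on(tokens, sep) of Source B: groups/cur accumulators, then groups + [cur]
def pvSplitStep (sep : List Char) (st : List (List (List Char)) × List (List Char)) (t : List Char) :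
    List (List (List Char)) × List (List Char) :=
  if t = sep then (st.1 ++ [st.2], []) else (st.1, st.2 ++ [t])

def pvSplitOn (tokens : List (List Char)) (sep : List Char) : List (List (List Char)) :=
  let st := tokens.foldl (pvSplitStep sep) ([], [])
  st.1 ++ [st.2]

-- render(words) of Source B: a space before every word except when nothing is there yet
def pvRender (words : List (List Char)) : List Char :=
  words.foldl (fun s w => (if s ≠ [] then s ++ [' '] else s) ++ w) []

def create_python_regex_alt (exp : String) : List String :=
  let tokens := (PySem.Chars.splitOn (PySem.Chars.strip exp.toList) [' ']).map pvClean
  ((pvSplitOn tokens "AND".toList).map (fun seg =>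
    pvPfx ++ PySem.Chars.join pvSep ((pvSplitOn seg "OR".toList).map pvRender) ++ pvSuf)).map
    String.ofList

-- ===== PRECONDITION & SPEC =====
def Spec_create_python_regex (exp : String) (out : List String) : Prop := out = create_python_regex_alt exp
instance (exp : String) (out : List String) : Decidable (Spec_create_python_regex exp out) := by unfold Spec_create_python_regex; infer_instance

-- ===== CLAIM (what is proved, stated in full; the proofs are below) =====
def Claim_equal_create_python_regex : Prop := ∀ (exp : String), Dom_create_python_regex exp → Spec_create_python_regex exp (create_python_regex exp)

-- ===== LEMMAS AND PROOFS =====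

-- the body of the current AND-segment as B renders it, and the rendered current OR-alternative
def pvBody (pend : List (List Char)) : List Char :=
  PySem.Chars.join pvSep ((pvSplitOn pend "OR".toList).map pvRender)

def pvCurR (pend : List (List Char)) : List Char :=
  pvRender ((pend.foldl (pvSplitStep "OR".toList) ([], [])).2)

-- characters surviving replace.go come from the scanned list or the replacement
theorem pvReplaceGo_mem {c : Char} (old new : List Char) (hold : old ≠ []) (hnew : c ∉ new) :
    ∀ (fuel : Nat) (l acc : List Char), l.length ≤ fuel → (old = [c] ∨ c ∉ l) → c ∉ acc →
      c ∉ PySem.Chars.replace.go old new fuel l acc := by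
  intro fuel
  induction fuel with
  | zero =>
    intro l acc hlen h3 hacc
    have : l = [] := by cases l <;> simp_all
    subst this
    simp [PySem.Chars.replace.go, hacc]
  | succ n ih =>
    intro l acc hlen h3 hacc
    cases l with
    | nil => simp [PySem.Chars.replace.go, hacc]
    | cons x t =>
      rw [PySem.Chars.replace.go]
      by_cases hp : old.isPrefixOf (x :: t)
      · simp only [hp, if_true]
        apply ih
        · simp only [List.length_drop, List.length_cons]
          have h1 : 1 ≤ old.length := by cases old <;> simp_all
          simp only [List.length_cons] at hlen
          omega
        · rcases h3 with h3 | h3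
          · exact Or.inl h3
          · exact Or.inr (fun hm => h3 (List.mem_of_mem_drop hm))
        · simp only [List.mem_append, List.mem_reverse]
          rintro (h | h) <;> [exact hnew h; exact hacc h]
      · simp only [hp]
        apply ih
        · simp at hlen ⊢; omega
        · rcases h3 with h3 | h3
          · exact Or.inl h3
          · exact Or.inr (fun hm => h3 (List.mem_cons_of_mem _ hm))
        · intro hm
          rcases List.mem_cons.mp hm with h | h
          · subst h
            rcases h3 with h3 | h3
            · apply hp; subst h3; simp [List.isPrefixOf]
            · exact h3 (List.mem_cons_self)
          · exact hacc h

theorem pvReplace_not_mem {c : Char} (s old new : List Char) (hold : old ≠ []) (hnew : c ∉ new)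
    (h3 : old = [c] ∨ c ∉ s) : c ∉ PySem.Chars.replace s old new := by
  unfold PySem.Chars.replace
  have : old.isEmpty = false := by cases old <;> simp_all
  rw [this]
  simp only [Bool.false_eq_true, if_false]
  exact pvReplaceGo_mem old new hold hnew s.length s [] le_rfl h3 (by simp)

-- a cleaned token never contains '(' — A's last-character test reads '(' only at alt starts
theorem pvClean_noParen (w : List Char) : '(' ∉ pvClean w := by
  unfold pvClean
  apply pvReplace_not_mem _ _ _ (by simp) (by simp)
  exact Or.inr (pvReplace_not_mem _ _ _ (by simp) (by simp) (Or.inl rfl))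

theorem pvJoin_concat (sep : List Char) (xs : List (List Char)) (y : List Char) :
    PySem.Chars.join sep (xs ++ [y]) =
      (if xs = [] then [] else PySem.Chars.join sep xs ++ sep) ++ y := by
  induction xs with
  | nil => simp [PySem.Chars.join, List.intercalate]
  | cons x xs ih =>
    cases xs with
    | nil => simp [PySem.Chars.join, List.intercalate]
    | cons x' xs' =>
      simp only [List.cons_append] at *
      rw [PySem.Chars.join_cons_cons, PySem.Chars.join_cons_cons, ih]
      simp

theorem pvRenderFold_mem {c : Char} :
    ∀ (ws : List (List Char)) (s : List Char),
      c ∈ ws.foldl (fun s w => (if s ≠ [] then s ++ [' '] else s) ++ w) s →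
      c ∈ s ∨ c = ' ' ∨ ∃ w ∈ ws, c ∈ w := by
  intro ws
  induction ws with
  | nil => intro s h; exact Or.inl h
  | cons w ws ih =>
    intro s h
    rcases ih _ h with h | h | ⟨w', hw', hc⟩
    · simp only [List.mem_append] at h
      rcases h with h | h
      · split at h
        · simp only [List.mem_append, List.mem_singleton] at h
          rcases h with h | h
          · exact Or.inl h
          · exact Or.inr (Or.inl h)
        · exact Or.inl h
      · exact Or.inr (Or.inr ⟨w, by simp, h⟩)
    · exact Or.inr (Or.inl h)
    · exact Or.inr (Or.inr ⟨w', by simp [hw'], hc⟩)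

theorem pvRender_mem {c : Char} (ws : List (List Char)) (h : c ∈ pvRender ws) :
    c = ' ' ∨ ∃ w ∈ ws, c ∈ w := by
  rcases pvRenderFold_mem ws [] h with h | h | h
  · simp at h
  · exact Or.inl h
  · exact Or.inr h

theorem pvRender_concat (ws : List (List Char)) (w : List Char) :
    pvRender (ws ++ [w]) = (if pvRender ws ≠ [] then pvRender ws ++ [' '] else pvRender ws) ++ w := by
  simp [pvRender, List.foldl_append]

-- split_on's groups accumulator is prepended untouched
theorem pvSplitFold_acc (sep : List Char) (ts : List (List Char)) :
    ∀ (g : List (List (List Char))) (cur : List (List Char)),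
    ts.foldl (pvSplitStep sep) (g, cur) =
      (g ++ (ts.foldl (pvSplitStep sep) ([], cur)).1, (ts.foldl (pvSplitStep sep) ([], cur)).2) := by
  induction ts with
  | nil => intro g cur; simp
  | cons t ts ih =>
    intro g cur
    simp only [List.foldl_cons]
    by_cases h : t = sep
    · simp only [pvSplitStep, h, if_true, eq_self_iff_true, if_pos]
      rw [ih (g ++ [cur]) []]
      rw [show ([] : List (List (List Char))) ++ [cur] = [cur] from rfl, ih [cur] []]
      simp
    · simp only [pvSplitStep, if_neg h]
      exact ih g (cur ++ [t])

theorem pvSplitFold_cur_mem (sep : List Char) (ts : List (List Char)) :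
    ∀ (g : List (List (List Char))) (cur : List (List Char)) (t : List Char),
      t ∈ (ts.foldl (pvSplitStep sep) (g, cur)).2 → t ∈ cur ∨ t ∈ ts := by
  induction ts with
  | nil => intro g cur t h; exact Or.inl h
  | cons x ts ih =>
    intro g cur t h
    simp only [List.foldl_cons] at h
    by_cases hx : x = sep
    · simp only [pvSplitStep, hx, if_true, eq_self_iff_true, if_pos] at h
      rcases ih _ _ _ h with h | h
      · simp at h
      · exact Or.inr (List.mem_cons_of_mem _ h)
    · simp only [pvSplitStep, if_neg hx] at h
      rcases ih _ _ _ h with h | h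
      · simp only [List.mem_append, List.mem_singleton] at h
        rcases h with h | h
        · exact Or.inl h
        · subst h; exact Or.inr List.mem_cons_self
      · exact Or.inr (List.mem_cons_of_mem _ h)

-- appending an "OR" token appends one separator to the segment body
theorem pvBody_or (pend : List (List Char)) :
    pvBody (pend ++ ["OR".toList]) = pvBody pend ++ pvSep := by
  unfold pvBody pvSplitOn
  rw [List.foldl_append]
  simp only [List.foldl_cons, List.foldl_nil, pvSplitStep, eq_self_iff_true, if_true]
  rw [List.map_append, List.map_append]
  simp only [List.map_cons, List.map_nil, pvRender, List.foldl_nil]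
  rw [pvJoin_concat]
  simp

-- appending a word appends it to the body, with a space iff the current alternative is nonempty
theorem pvBody_word (pend : List (List Char)) (w : List Char) (hw : w ≠ "OR".toList) :
    pvBody (pend ++ [w]) =
      pvBody pend ++ (if pvCurR pend = [] then [] else [' ']) ++ w := by
  unfold pvBody pvSplitOn pvCurR
  rw [List.foldl_append]
  simp only [List.foldl_cons, List.foldl_nil, pvSplitStep, if_neg hw]
  rw [List.map_append, List.map_append]
  simp only [List.map_cons, List.map_nil]
  rw [pvJoin_concat, pvJoin_concat, pvRender_concat]
  split_ifs <;> simp_all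

-- A's str[len(str)-1] is the last character
theorem pvGetLast_test (s : List Char) (hs : s ≠ []) :
    PySem.Chars.pyGet? s (PySem.Chars.len s - 1) = s.getLast? := by
  have h1 : (PySem.Chars.len s - 1 : Int) = ((s.length - 1 : Nat) : Int) := by
    simp only [PySem.Chars.len_eq]
    have : 1 ≤ s.length := by cases s <;> simp_all
    omega
  rw [h1]
  simp only [PySem.Chars.pyGet?_eq_listPyGet?, PySem.List.pyGet?_natCast]
  exact List.getLast?_eq_getElem?.symm

-- A's running string ends in '(' exactly when the current OR-alternative is still empty
theorem pvStr_getLast (pend : List (List Char)) (hp : ∀ w ∈ pend, '(' ∉ w) :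
    ((pvPfx ++ pvBody pend).getLast? = some '(') ↔ pvCurR pend = [] := by
  unfold pvBody pvSplitOn pvCurR
  rw [List.map_append]
  simp only [List.map_cons, List.map_nil]
  rw [pvJoin_concat]
  set g := (pend.foldl (pvSplitStep "OR".toList) ([], [])).1 with hg
  set c := (pend.foldl (pvSplitStep "OR".toList) ([], [])).2 with hc
  by_cases h : pvRender c = []
  · simp only [h, List.append_nil]
    constructor
    · intro _; trivial
    · intro _
      rw [List.getLast?_append]
      split_ifs with hq
      · decide
      · rw [List.getLast?_append]
        rw [show pvSep.getLast? = some '(' from by decide]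
        simp
  · simp only [h, iff_false]
    intro hl
    cases hrc : (pvRender c).getLast? with
    | none => exact h (List.getLast?_eq_none_iff.mp hrc)
    | some a =>
      rw [List.getLast?_append, List.getLast?_append, hrc] at hl
      simp only [Option.some_or] at hl
      have ha : a = '(' := Option.some.inj hl
      have hmem := List.mem_of_getLast? hrc
      rcases pvRender_mem c hmem with h2 | ⟨w, hw, h2⟩
      · rw [ha] at h2; exact absurd h2.symm (by decide)
      · rcases pvSplitFold_cur_mem "OR".toList pend [] [] w (hc ▸ hw) with h3 | h3
        · exact absurd h3 List.not_mem_nil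
        · rw [ha] at h2; exact hp w h3 h2

-- A's inline cleaning chain is pvClean
theorem pvStepA_eq (st : List (List Char) × List Char) (w : List Char) :
    pvStepA st w =
      (if pvClean w = "OR".toList then (st.1, st.2 ++ pvSep)
       else if pvClean w = "AND".toList then (st.1 ++ [st.2 ++ pvSuf], pvPfx)
       else (st.1, (if PySem.Chars.pyGet? st.2 (PySem.Chars.len st.2 - 1) ≠ some '(' then st.2 ++ [' '] else st.2) ++ pvClean w)) := rfl

theorem pvBody_nil : pvBody [] = [] := by decide

-- MAIN: A's loop, started on a segment already holding the cleaned tokens 'pend', finishes like B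
theorem pvMain : ∀ (l : List (List Char)) (fl : List (List Char)) (pend : List (List Char)),
    (∀ w ∈ pend, '(' ∉ w) →
    (l.foldl pvStepA (fl, pvPfx ++ pvBody pend)).1 ++ [(l.foldl pvStepA (fl, pvPfx ++ pvBody pend)).2 ++ pvSuf] =
      fl ++ (((l.map pvClean).foldl (pvSplitStep "AND".toList) ([], pend)).1 ++
             [((l.map pvClean).foldl (pvSplitStep "AND".toList) ([], pend)).2]).map
            (fun seg => pvPfx ++ pvBody seg ++ pvSuf) := by
  intro l
  induction l with
  | nil => intro fl pend hp; simp [List.append_assoc]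
  | cons w ws ih =>
    intro fl pend hp
    simp only [List.foldl_cons, List.map_cons, pvStepA_eq]
    by_cases h1 : pvClean w = "OR".toList
    · rw [if_pos h1]
      rw [h1]
      have hstep : pvSplitStep "AND".toList ([], pend) "OR".toList = ([], pend ++ ["OR".toList]) := by
        unfold pvSplitStep; rw [if_neg (by decide)]
      rw [hstep]
      have : (pvPfx ++ pvBody pend) ++ pvSep = pvPfx ++ pvBody (pend ++ ["OR".toList]) := by
        rw [pvBody_or, List.append_assoc]
      rw [this]
      exact ih fl (pend ++ ["OR".toList]) (by
        intro w' hw'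
        rcases List.mem_append.mp hw' with h | h
        · exact hp w' h
        · simp only [List.mem_singleton] at h; subst h; decide)
    · rw [if_neg h1]
      by_cases h2 : pvClean w = "AND".toList
      · rw [if_pos h2]
        rw [h2]
        have hstep : pvSplitStep "AND".toList ([], pend) "AND".toList = ([pend], []) := by
          unfold pvSplitStep; rw [if_pos rfl]; simp
        rw [hstep]
        have hih := ih (fl ++ [(pvPfx ++ pvBody pend) ++ pvSuf]) [] (by intro w' hw'; simp at hw')
        rw [pvBody_nil, List.append_nil] at hih
        rw [hih]
        rw [pvSplitFold_acc "AND".toList (ws.map pvClean) [pend] []]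
        simp [List.append_assoc]
      · rw [if_neg h2]
        have hstr : pvPfx ++ pvBody pend ≠ [] := by
          intro hcontra
          have := congrArg List.length hcontra
          simp [pvPfx] at this
        have htest : (PySem.Chars.pyGet? (pvPfx ++ pvBody pend) (PySem.Chars.len (pvPfx ++ pvBody pend) - 1) ≠ some '(') ↔ pvCurR pend ≠ [] := by
          rw [pvGetLast_test _ hstr]
          exact not_congr (pvStr_getLast pend hp)
        have h2' : pvClean w ≠ ['A', 'N', 'D'] := by simpa using h2
        have hstep : pvSplitStep "AND".toList ([], pend) (pvClean w) = ([], pend ++ [pvClean w]) := by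
          simp [pvSplitStep, h2']
        rw [hstep]
        have hif : (if PySem.Chars.pyGet? (pvPfx ++ pvBody pend) (PySem.Chars.len (pvPfx ++ pvBody pend) - 1) ≠ some '(' then (pvPfx ++ pvBody pend) ++ [' '] else pvPfx ++ pvBody pend) ++ pvClean w = pvPfx ++ pvBody (pend ++ [pvClean w]) := by
          rw [pvBody_word pend (pvClean w) h1]
          by_cases hcur : pvCurR pend = []
          · rw [if_neg (by rw [htest]; exact not_not_intro hcur), if_pos hcur]
            simp
          · rw [if_pos (htest.mpr hcur), if_neg hcur]
            simp
        rw [hif]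
        exact ih fl (pend ++ [pvClean w]) (by
          intro w' hw'
          rcases List.mem_append.mp hw' with h | h
          · exact hp w' h
          · simp only [List.mem_singleton] at h; subst h; exact pvClean_noParen w)

-- ===== VERDICT (by name: the statement is the Claim_ definition above) =====
theorem create_python_regex_spec : Claim_equal_create_python_regex := by
  intro exp _
  unfold Spec_create_python_regex create_python_regex create_python_regex_alt
  have h := pvMain (PySem.Chars.splitOn (PySem.Chars.strip exp.toList) [' ']) [] [] (by intro w hw; simp at hw)
  rw [pvBody_nil, List.append_nil] at h
  simp only [List.nil_append] at h
  unfold pvSplitOn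
  simp only [pvBody] at h
  unfold pvSplitOn at h
  exact congrArg (List.map String.ofList) h
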